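-- pv_equiv track=rewrite | github.com/rpwalsh/DispatchLayer | scripts/capture_pvdaq_snapshot.py | _metric_columns
-- ===== SOURCE A (Python) =====
-- METRIC_ALIASES = {
--     "ac_power": ["ac_power", "ac_power_kw", "ac power", "power_kw", "power"],
--     "temperature_c": ["temperature_c", "ambient_temp", "air_temperature", "temperature"],
--     "wind_speed_mps": ["wind_speed_mps", "wind_speed", "windspeed"],
--     "ghi_wm2": ["ghi", "ghi_wm2", "irradiance", "global_irradiance"],
--     "quality_score": ["quality_score", "data_quality", "quality"],
-- }
--
-- def _slug(value: str) -> str: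
--     return value.strip().lower().replace("-", "_").replace(" ", "_")
--
-- def _metric_columns(fieldnames: list[str]) -> dict[str, str]:
--     by_slug = {_slug(name): name for name in fieldnames}
--     out: dict[str, str] = {}
--     for canonical, aliases in METRIC_ALIASES.items():
--         for alias in aliases:
--             hit = by_slug.get(_slug(alias))
--             if hit:
--                 out[canonical] = hit
--                 break
--     return out
-- ===== SOURCE B (Python) =====
-- METRIC_ALIASES = {
--     "ac_power": ["ac_power", "ac_power_kw", "ac power", "power_kw", "power"],
--     "temperature_c": ["temperature_c", "ambient_temp", "air_temperature", "temperature"],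
--     "wind_speed_mps": ["wind_speed_mps", "wind_speed", "windspeed"],
--     "ghi_wm2": ["ghi", "ghi_wm2", "irradiance", "global_irradiance"],
--     "quality_score": ["quality_score", "data_quality", "quality"],
-- }
--
-- def _slug(value: str) -> str:
--     return value.strip().lower().replace("-", "_").replace(" ", "_")
--
-- def _metric_columns(fieldnames: list[str]) -> dict[str, str]:
--     # Inverted index: alias slug -> (canonical, priority), then ONE pass over
--     # fieldnames keeping, per canonical, the best-priority (ties -> last) column.
--     rank: dict[str, tuple[str, int]] = {}
--     for canonical, aliases in METRIC_ALIASES.items():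
--         for r, alias in enumerate(aliases):
--             rank.setdefault(_slug(alias), (canonical, r))
--     best: dict[str, tuple[int, str]] = {}
--     for name in fieldnames:
--         info = rank.get(_slug(name))
--         if info is not None:
--             canonical, r = info
--             prev = best.get(canonical)
--             if prev is None or r <= prev[0]:
--                 best[canonical] = (r, name)
--     return {canonical: best[canonical][1] for canonical in METRIC_ALIASES if canonical in best}
-- ===== Notes on version B (the rewrite author's own statement) =====
-- stated objective: alternative
-- what changed: B inverts the data flow: it builds an inverted index from alias slug to (canonical, priority) and then makes a single pass over fieldnames keeping, per canonical, the best-priority (ties -> last) column, instead of A's per-canonical scan of aliases against a field-slug dict.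
import Mathlib
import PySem

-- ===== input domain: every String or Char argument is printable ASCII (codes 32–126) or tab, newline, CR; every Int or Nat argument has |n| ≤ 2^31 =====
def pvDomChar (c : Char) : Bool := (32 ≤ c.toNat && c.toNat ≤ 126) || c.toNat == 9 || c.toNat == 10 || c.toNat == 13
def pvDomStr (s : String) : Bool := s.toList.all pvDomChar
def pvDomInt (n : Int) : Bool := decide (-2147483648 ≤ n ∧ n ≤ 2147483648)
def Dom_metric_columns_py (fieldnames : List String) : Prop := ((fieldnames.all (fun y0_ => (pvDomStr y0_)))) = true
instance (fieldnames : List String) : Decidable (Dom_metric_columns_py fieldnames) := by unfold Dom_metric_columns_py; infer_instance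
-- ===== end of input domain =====

-- B inverts the data flow: an inverted alias-slug → (canonical, priority) index plus ONE pass over
-- fieldnames (keeping, per canonical, the best-priority match, ties → last), instead of A's
-- per-canonical alias scan against a field-slug dict; same return value, no speed claim.

def METRIC_ALIASES : List (String × List String) :=
  [("ac_power", ["ac_power", "ac_power_kw", "ac power", "power_kw", "power"]),
   ("temperature_c", ["temperature_c", "ambient_temp", "air_temperature", "temperature"]),
   ("wind_speed_mps", ["wind_speed_mps", "wind_speed", "windspeed"]),
   ("ghi_wm2", ["ghi", "ghi_wm2", "irradiance", "global_irradiance"]),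
   ("quality_score", ["quality_score", "data_quality", "quality"])]

def pySlug (value : String) : String :=
  PySem.Str.replace (PySem.Str.replace (PySem.Str.lower (PySem.Str.strip value)) "-" "_") " " "_"

-- ===== PORT A =====
-- inner `for alias in aliases: … break` loop, returning the chosen hit (if any)
def findAlias (bySlug : PySem.Dict String String) : List String → Option String
  | [] => none
  | a :: rest =>
    match bySlug.get? (pySlug a) with
    | some hit => if hit == "" then findAlias bySlug rest else some hit
    | none => findAlias bySlug rest

def metric_columns_py (fieldnames : List String) : List (String × String) :=
  let bySlug := fieldnames.foldl (fun d n => d.insert (pySlug n) n) PySem.Dict.empty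
  (METRIC_ALIASES.foldl (fun (out : PySem.Dict String String) ca =>
      match findAlias bySlug ca.2 with
      | some hit => out.insert ca.1 hit
      | none => out) PySem.Dict.empty).items

-- ===== PORT B =====
-- inverted index: alias slug → (canonical, priority); setdefault keeps the first entry
def buildRank : PySem.Dict String (String × Int) :=
  METRIC_ALIASES.foldl (fun rk ca =>
    (PySem.List.enumerate ca.2).foldl
      (fun rk ra => rk.setdefault (pySlug ra.2) (ca.1, ra.1)) rk)
    PySem.Dict.empty

-- single pass over fieldnames: per canonical keep (best priority, last such name)
def bestFold (fieldnames : List String) : PySem.Dict String (Int × String) :=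
  fieldnames.foldl (fun best name =>
    match buildRank.get? (pySlug name) with
    | some info =>
      match best.get? info.1 with
      | none => best.insert info.1 (info.2, name)
      | some prev => if info.2 ≤ prev.1 then best.insert info.1 (info.2, name) else best
    | none => best) PySem.Dict.empty

def metric_columns_py_alt (fieldnames : List String) : List (String × String) :=
  let best := bestFold fieldnames
  (METRIC_ALIASES.foldl (fun (out : PySem.Dict String String) ca =>
      match (best.get? ca.1).map (fun p => p.2) with
      | some hit => out.insert ca.1 hit
      | none => out) PySem.Dict.empty).items

-- ===== PRECONDITION & SPEC =====
def Spec_metric_columns_py (fieldnames : List String) (out : List (String × String)) : Prop := out = metric_columns_py_alt fieldnames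
instance (fieldnames : List String) (out : List (String × String)) : Decidable (Spec_metric_columns_py fieldnames out) := by unfold Spec_metric_columns_py; infer_instance

-- ===== CLAIM (what is proved, stated in full; the proofs are below) =====
def Claim_equal_metric_columns_py : Prop := ∀ (fieldnames : List String), Dom_metric_columns_py fieldnames → Spec_metric_columns_py fieldnames (metric_columns_py fieldnames)

-- ===== LEMMAS AND PROOFS =====

-- last fieldname whose slug equals target (what A's by_slug dict stores per slug)
def lastSlugMatch (fieldnames : List String) (target : String) : Option String :=
  fieldnames.foldl (fun acc n => if pySlug n == target then some n else acc) none

-- priority of slug s in an alias list: index of the FIRST alias with that slug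
def rankOf : List String → String → Option Int
  | [], _ => none
  | a :: rest, s => if pySlug a = s then some 0 else (rankOf rest s).map (· + 1)

-- first-hit (index, last matching field) over the alias list, A-style
def scanIdx (fs : List String) : List String → Option (Int × String)
  | [] => none
  | a :: rest =>
    match lastSlugMatch fs (pySlug a) with
    | some hit => some (0, hit)
    | none => (scanIdx fs rest).map (fun p => (p.1 + 1, p.2))

-- one B-style update step, specialised to a single alias list
def stepIdx (al : List String) (acc : Option (Int × String)) (x : String) : Option (Int × String) :=
  match rankOf al (pySlug x) with
  | none => acc
  | some rx =>
    match acc with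
    | none => some (rx, x)
    | some p => if rx ≤ p.1 then some (rx, x) else acc

-- first pair (i, a) with slug(a) = s
def firstIdx : List (Int × String) → String → Option Int
  | [], _ => none
  | ra :: rest, s => if pySlug ra.2 = s then some ra.1 else firstIdx rest s

-- what buildRank's nested setdefault loop computes at a key
def globalRank : List (String × List String) → String → Option (String × Int)
  | [], _ => none
  | ca :: rest, s => ((rankOf ca.2 s).map (fun r => (ca.1, r))).or (globalRank rest s)

-- projection of bestFold's step to a single canonical key c
def pstep (c : String) (acc : Option (Int × String)) (name : String) : Option (Int × String) :=
  match buildRank.get? (pySlug name) with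
  | some info =>
    if info.1 = c then
      match acc with
      | none => some (info.2, name)
      | some prev => if info.2 ≤ prev.1 then some (info.2, name) else acc
    else acc
  | none => acc

theorem get_fold (xs : List String) (d : PySem.Dict String String) (s : String) :
    (xs.foldl (fun d n => d.insert (pySlug n) n) d).get? s
      = xs.foldl (fun acc n => if pySlug n == s then some n else acc) (d.get? s) := by
  induction xs generalizing d with
  | nil => rfl
  | cons x xs ih =>
    simp only [List.foldl_cons]
    rw [ih]
    have hinit : (d.insert (pySlug x) x).get? s = (if pySlug x == s then some x else d.get? s) := by
      rw [PySem.Dict.get?_insert]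
      by_cases h : pySlug x = s
      · rw [if_pos h.symm, if_pos (beq_iff_eq.mpr h)]
      · rw [if_neg (Ne.symm h), if_neg (by simp [h])]
    rw [hinit]

theorem lookup_eq (fieldnames : List String) (s : String) :
    (fieldnames.foldl (fun d n => d.insert (pySlug n) n) PySem.Dict.empty).get? s
      = lastSlugMatch fieldnames s := by
  rw [get_fold]; simp [lastSlugMatch, PySem.Dict.get?_empty]

theorem lastSlugMatch_aux (t : String) (fs : List String) :
    ∀ (acc : Option String) (n : String),
      fs.foldl (fun acc n => if pySlug n == t then some n else acc) acc = some n →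
      pySlug n = t ∨ acc = some n := by
  induction fs with
  | nil => intro acc n h; exact Or.inr h
  | cons x fs ih =>
    intro acc n h
    simp only [List.foldl_cons] at h
    rcases ih _ n h with h1 | h1
    · exact Or.inl h1
    · by_cases hx : pySlug x = t
      · rw [if_pos (beq_iff_eq.mpr hx)] at h1
        exact Or.inl (by cases h1; exact hx)
      · rw [if_neg (by simp [hx])] at h1
        exact Or.inr h1

theorem lastSlugMatch_slug {fs : List String} {t n : String}
    (h : lastSlugMatch fs t = some n) : pySlug n = t := by
  rcases lastSlugMatch_aux t fs none n h with h1 | h1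
  · exact h1
  · cases h1

theorem rankOf_nonneg : ∀ (al : List String) (s : String) (r : Int),
    rankOf al s = some r → 0 ≤ r := by
  intro al
  induction al with
  | nil => intro s r h; cases h
  | cons a rest ih =>
    intro s r h
    simp only [rankOf] at h
    by_cases ha : pySlug a = s
    · rw [if_pos ha] at h; cases h; norm_num
    · rw [if_neg ha] at h
      cases hr : rankOf rest s with
      | none => rw [hr] at h; cases h
      | some r' => rw [hr] at h; simp at h; have := ih s r' hr; omega

theorem rankOf_mem : ∀ (al : List String) (s : String) (r : Int),
    rankOf al s = some r → s ∈ al.map pySlug := by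
  intro al
  induction al with
  | nil => intro s r h; cases h
  | cons a rest ih =>
    intro s r h
    simp only [rankOf] at h
    by_cases ha : pySlug a = s
    · simp [ha]
    · rw [if_neg ha] at h
      cases hr : rankOf rest s with
      | none => rw [hr] at h; cases h
      | some r' => simp [ih s r' hr]

theorem rankOf_eq_none {al : List String} {s : String}
    (h : s ∉ al.map pySlug) : rankOf al s = none := by
  cases hr : rankOf al s with
  | none => rfl
  | some r => exact absurd (rankOf_mem al s r hr) h

theorem scanIdx_nonneg (fs : List String) : ∀ (al : List String) (p : Int × String),
    scanIdx fs al = some p → 0 ≤ p.1 := by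
  intro al
  induction al with
  | nil => intro p h; cases h
  | cons a rest ih =>
    intro p h
    simp only [scanIdx] at h
    cases hm : lastSlugMatch fs (pySlug a) with
    | some hit => rw [hm] at h; cases h; norm_num
    | none =>
      rw [hm] at h
      cases hs : scanIdx fs rest with
      | none => rw [hs] at h; cases h
      | some q => rw [hs] at h; cases h; have := ih q hs; simp; omega

theorem scanIdx_nil : ∀ (al : List String), scanIdx [] al = none := by
  intro al
  induction al with
  | nil => rfl
  | cons a rest ih => simp [scanIdx, lastSlugMatch, ih]

theorem lastSlugMatch_append (fs : List String) (x : String) (t : String) :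
    lastSlugMatch (fs ++ [x]) t
      = if pySlug x == t then some x else lastSlugMatch fs t := by
  simp [lastSlugMatch, List.foldl_append]

theorem scanIdx_step (fs : List String) (x : String) : ∀ (al : List String),
    scanIdx (fs ++ [x]) al = stepIdx al (scanIdx fs al) x := by
  intro al
  induction al with
  | nil => simp [scanIdx, stepIdx, rankOf]
  | cons a rest ih =>
    by_cases hx : pySlug a = pySlug x
    · have h1 : lastSlugMatch (fs ++ [x]) (pySlug a) = some x := by
        rw [lastSlugMatch_append, if_pos (beq_iff_eq.mpr hx.symm)]
      have hrank : rankOf (a :: rest) (pySlug x) = some 0 := by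
        simp [rankOf, hx]
      rw [show scanIdx (fs ++ [x]) (a :: rest) = some (0, x) by simp [scanIdx, h1]]
      simp only [stepIdx, hrank]
      cases hs : scanIdx fs (a :: rest) with
      | none => rfl
      | some p =>
        have h0 : (0 : Int) ≤ p.1 := scanIdx_nonneg fs _ p hs
        simp [if_pos h0]
    · have h1 : lastSlugMatch (fs ++ [x]) (pySlug a) = lastSlugMatch fs (pySlug a) := by
        rw [lastSlugMatch_append, if_neg (by simp [Ne.symm hx])]
      have hrank : rankOf (a :: rest) (pySlug x) = (rankOf rest (pySlug x)).map (· + 1) := by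
        simp [rankOf, hx]
      cases hm : lastSlugMatch fs (pySlug a) with
      | some hit =>
        have hL : scanIdx (fs ++ [x]) (a :: rest) = some (0, hit) := by
          simp [scanIdx, h1, hm]
        have hA : scanIdx fs (a :: rest) = some (0, hit) := by
          simp [scanIdx, hm]
        rw [hL, hA]
        simp only [stepIdx, hrank]
        cases hr : rankOf rest (pySlug x) with
        | none => rfl
        | some r =>
          have hr0 : (0 : Int) ≤ r := rankOf_nonneg rest _ r hr
          simp only [Option.map_some]
          rw [if_neg (by omega)]
      | none =>
        have hL : scanIdx (fs ++ [x]) (a :: rest)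
            = (scanIdx (fs ++ [x]) rest).map (fun p => (p.1 + 1, p.2)) := by
          simp [scanIdx, h1, hm]
        have hA : scanIdx fs (a :: rest) = (scanIdx fs rest).map (fun p => (p.1 + 1, p.2)) := by
          simp [scanIdx, hm]
        rw [hL, hA, ih]
        simp only [stepIdx, hrank]
        cases hr : rankOf rest (pySlug x) with
        | none => simp
        | some r =>
          simp only [Option.map_some]
          cases hs : scanIdx fs rest with
          | none => simp
          | some p =>
            simp only [Option.map_some]
            by_cases hle : r ≤ p.1
            · rw [if_pos hle, if_pos (by simp; omega)]; rfl
            · rw [if_neg hle, if_neg (by simp; omega)]; rfl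

theorem scanIdx_eq_foldl (al : List String) (fs : List String) :
    scanIdx fs al = fs.foldl (stepIdx al) none := by
  induction fs using List.reverseRecOn with
  | nil => exact scanIdx_nil al
  | append_singleton fs x ih =>
    rw [scanIdx_step fs x al, ih, List.foldl_append, List.foldl_cons, List.foldl_nil]

theorem pySlug_empty : pySlug "" = "" := rfl

theorem findAlias_eq (fs : List String) : ∀ (al : List String),
    (∀ a ∈ al, pySlug a ≠ "") →
    findAlias (fs.foldl (fun d n => d.insert (pySlug n) n) PySem.Dict.empty) al
      = (scanIdx fs al).map (fun p => p.2) := by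
  intro al
  induction al with
  | nil => intro _; rfl
  | cons a rest ih =>
    intro hne
    simp only [findAlias, scanIdx, lookup_eq]
    cases hm : lastSlugMatch fs (pySlug a) with
    | none =>
      rw [ih (fun b hb => hne b (List.mem_cons_of_mem _ hb))]
      cases scanIdx fs rest <;> rfl
    | some hit =>
      have hslug : pySlug hit = pySlug a := lastSlugMatch_slug hm
      have hhit : hit ≠ "" := fun h => hne a (by simp) (by rw [← hslug, h, pySlug_empty])
      simp [hhit]

theorem setdefault_fold_get (c s : String) : ∀ (l : List (Int × String)) (rk : PySem.Dict String (String × Int)),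
    (l.foldl (fun rk ra => rk.setdefault (pySlug ra.2) (c, ra.1)) rk).get? s
      = (rk.get? s).or ((firstIdx l s).map (fun i => (c, i))) := by
  intro l
  induction l with
  | nil => intro rk; simp [firstIdx]
  | cons ra rest ih =>
    intro rk
    simp only [List.foldl_cons, firstIdx]
    rw [ih]
    by_cases h : pySlug ra.2 = s
    · rw [if_pos h, h, PySem.Dict.get?_setdefault_self]
      cases hv : rk.get? s <;> simp
    · rw [if_neg h, PySem.Dict.get?_setdefault_of_ne rk (c, ra.1) (fun he => h he.symm)]

theorem firstIdx_enumerate (s : String) : ∀ (al : List String) (k : Int),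
    firstIdx (PySem.List.enumerate al k) s = (rankOf al s).map (· + k) := by
  intro al
  induction al with
  | nil => intro k; rfl
  | cons a rest ih =>
    intro k
    rw [PySem.List.enumerate_cons]
    simp only [firstIdx, rankOf]
    by_cases h : pySlug a = s
    · simp [h]
    · rw [if_neg h, if_neg h, ih]
      cases rankOf rest s <;> simp; omega

theorem buildRank_fold_get (s : String) : ∀ (ms : List (String × List String)) (d : PySem.Dict String (String × Int)),
    (ms.foldl (fun rk ca =>
        (PySem.List.enumerate ca.2).foldl
          (fun rk ra => rk.setdefault (pySlug ra.2) (ca.1, ra.1)) rk) d).get? s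
      = (d.get? s).or (globalRank ms s) := by
  intro ms
  induction ms with
  | nil => intro d; simp [globalRank]
  | cons ca rest ih =>
    intro d
    simp only [List.foldl_cons, globalRank]
    rw [ih, setdefault_fold_get, firstIdx_enumerate]
    have : (rankOf ca.2 s).map (· + (0:Int)) = rankOf ca.2 s := by
      cases rankOf ca.2 s <;> simp
    rw [this, Option.or_assoc]

theorem buildRank_get (s : String) :
    buildRank.get? s = globalRank METRIC_ALIASES s := by
  rw [buildRank, buildRank_fold_get]
  simp [PySem.Dict.get?_empty]

theorem globalRank_fst_mem : ∀ (ms : List (String × List String)) (s : String) (info : String × Int),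
    globalRank ms s = some info → info.1 ∈ ms.map Prod.fst := by
  intro ms
  induction ms with
  | nil => intro s info h; cases h
  | cons ca rest ih =>
    intro s info h
    simp only [globalRank] at h
    cases hr : rankOf ca.2 s with
    | some r => rw [hr] at h; simp at h; simp [← h]
    | none => rw [hr] at h; simp at h; simp [ih s info h]

theorem globalRank_match (f : Int → Option (Int × String)) (acc : Option (Int × String)) (s : String) :
    ∀ (ms : List (String × List String)) (c : String) (al : List String),
    (ms.map Prod.fst).Nodup →
    ms.Pairwise (fun p q => ∀ t ∈ p.2.map pySlug, t ∉ q.2.map pySlug) →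
    (c, al) ∈ ms →
    (match globalRank ms s with
     | some info => if info.1 = c then f info.2 else acc
     | none => acc)
      = (match rankOf al s with | some r => f r | none => acc) := by
  intro ms
  induction ms with
  | nil => intro c al _ _ hmem; cases hmem
  | cons ca rest ih =>
    intro c al hnd hpair hmem
    simp only [List.map_cons, List.nodup_cons] at hnd
    rcases List.pairwise_cons.mp hpair with ⟨hhead, hpair'⟩
    simp only [globalRank]
    cases hr' : rankOf ca.2 s with
    | some r' =>
      simp only [Option.map_some, Option.some_or]
      rcases List.mem_cons.mp hmem with heq | hmem'
      · subst heq
        rw [if_pos (rfl : ((c, al).1 : String) = c), show rankOf al s = some r' from hr']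
      · have hc : ca.1 ≠ c := by
          intro h
          exact hnd.1 (h ▸ (List.mem_map.mpr ⟨(c, al), hmem', rfl⟩))
        show (if ca.1 = c then f r' else acc) = _
        rw [if_neg hc]
        have hs1 : s ∈ ca.2.map pySlug := rankOf_mem _ _ _ hr'
        have hs2 : s ∉ al.map pySlug := hhead (c, al) hmem' s hs1
        rw [rankOf_eq_none hs2]
    | none =>
      simp only [Option.map_none, Option.none_or]
      rcases List.mem_cons.mp hmem with heq | hmem'
      · subst heq
        rw [show rankOf al s = (none : Option Int) from hr']
        cases hg : globalRank rest s with
        | none => rfl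
        | some info =>
          have hmemf : info.1 ∈ rest.map Prod.fst := globalRank_fst_mem rest s info hg
          show (if info.1 = c then f info.2 else acc) = acc
          rw [if_neg (fun (h : info.1 = c) => hnd.1 (h ▸ hmemf))]
      · exact ih c al hnd.2 hpair' hmem'

set_option maxRecDepth 8192 in
theorem pstep_eq (c : String) (al : List String)
    (hmem : (c, al) ∈ METRIC_ALIASES) :
    ∀ (acc : Option (Int × String)) (x : String), pstep c acc x = stepIdx al acc x := by
  intro acc x
  have hnd : (METRIC_ALIASES.map Prod.fst).Nodup := by decide
  have hpair : METRIC_ALIASES.Pairwise (fun p q => ∀ t ∈ p.2.map pySlug, t ∉ q.2.map pySlug) := by decide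
  unfold pstep
  rw [buildRank_get]
  refine (globalRank_match
    (fun r => match acc with
      | none => some (r, x)
      | some prev => if r ≤ prev.1 then some (r, x) else acc)
    acc (pySlug x) METRIC_ALIASES c al hnd hpair hmem).trans ?_
  cases h : rankOf al (pySlug x) <;> simp [stepIdx, h]

theorem bestFold_get (c : String) : ∀ (fs : List String) (d : PySem.Dict String (Int × String)),
    (fs.foldl (fun best name =>
      match buildRank.get? (pySlug name) with
      | some info =>
        match best.get? info.1 with
        | none => best.insert info.1 (info.2, name)
        | some prev => if info.2 ≤ prev.1 then best.insert info.1 (info.2, name) else best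
      | none => best) d).get? c
      = fs.foldl (pstep c) (d.get? c) := by
  intro fs
  induction fs with
  | nil => intro d; rfl
  | cons x fs ih =>
    intro d
    simp only [List.foldl_cons]
    rw [ih]
    have hstep : (match buildRank.get? (pySlug x) with
      | some info =>
        match d.get? info.1 with
        | none => d.insert info.1 (info.2, x)
        | some prev => if info.2 ≤ prev.1 then d.insert info.1 (info.2, x) else d
      | none => d).get? c = pstep c (d.get? c) x := by
      unfold pstep
      cases hb : buildRank.get? (pySlug x) with
      | none => rfl
      | some info =>
        dsimp only
        by_cases hc : info.1 = c
        · rw [if_pos hc, ← hc]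
          cases hprev : d.get? info.1 with
          | none => exact PySem.Dict.get?_insert_self d info.1 (info.2, x)
          | some prev =>
            dsimp only
            by_cases hle : info.2 ≤ prev.1
            · rw [if_pos hle, if_pos hle]
              exact PySem.Dict.get?_insert_self d info.1 (info.2, x)
            · rw [if_neg hle, if_neg hle, hprev]
        · rw [if_neg hc]
          cases hprev : d.get? info.1 with
          | none => exact PySem.Dict.get?_insert_of_ne d (info.2, x) (fun h => hc h.symm)
          | some prev =>
            dsimp only
            by_cases hle : info.2 ≤ prev.1
            · rw [if_pos hle]
              exact PySem.Dict.get?_insert_of_ne d (info.2, x) (fun h => hc h.symm)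
            · rw [if_neg hle]
    rw [hstep]

theorem column_eq (fs : List String) (c : String) (al : List String)
    (hmem : (c, al) ∈ METRIC_ALIASES) (hne : ∀ a ∈ al, pySlug a ≠ "") :
    findAlias (fs.foldl (fun d n => d.insert (pySlug n) n) PySem.Dict.empty) al
      = ((bestFold fs).get? c).map (fun p => p.2) := by
  rw [findAlias_eq fs al hne, scanIdx_eq_foldl]
  rw [bestFold, bestFold_get c fs PySem.Dict.empty, PySem.Dict.get?_empty]
  have hfun : pstep c = stepIdx al := funext fun acc => funext fun x => pstep_eq c al hmem acc x
  rw [hfun]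

-- ===== VERDICT (by name: the statement is the Claim_ definition above) =====
set_option maxRecDepth 100000 in
theorem metric_columns_py_spec : Claim_equal_metric_columns_py := by
  intro fs _
  unfold Spec_metric_columns_py metric_columns_py metric_columns_py_alt
  show (METRIC_ALIASES.foldl (fun (out : PySem.Dict String String) ca =>
      match findAlias (fs.foldl (fun d n => d.insert (pySlug n) n) PySem.Dict.empty) ca.2 with
      | some hit => out.insert ca.1 hit
      | none => out) PySem.Dict.empty).items
    = (METRIC_ALIASES.foldl (fun (out : PySem.Dict String String) ca =>
      match ((bestFold fs).get? ca.1).map (fun p => p.2) with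
      | some hit => out.insert ca.1 hit
      | none => out) PySem.Dict.empty).items
  congr 1
  apply PySem.List.foldl_congr_mem
  intro out ca hca
  have hne : ∀ a ∈ ca.2, pySlug a ≠ "" := by fin_cases hca <;> decide
  rw [column_eq fs ca.1 ca.2 (by simpa using hca) hne]
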